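-- pv_equiv track=rewrite | github.com/Ugbot/duckdb_piamon | benchmark_paimon_performance.py | extract_partition_from_path
-- ===== SOURCE A (Python) =====
-- def extract_partition_from_path(file_path):
--     """Extract partition information from file path"""
--     parts = file_path.split('/')
--     partition = {}
--     for part in parts:
--         if '=' in part:
--             key, value = part.split('=', 1)
--             partition[key] = value
--     return partition
-- ===== SOURCE B (Python) =====
-- import re
--
-- def extract_partition_from_path(file_path):
--     """Extract partition information from file path"""
--     return dict(re.findall(r'(?:^|(?<=/))([^/=]*)=([^/]*)', file_path))
-- ===== Notes on version B (the rewrite author's own statement) =====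
-- stated objective: idiomatic
-- what changed: Replaced the split-on-'/' loop with per-segment split('=',1) and dict assignment by a single regex scan of the whole path, dict(re.findall(r'(?:^|(?<=/))([^/=]*)=([^/]*)', file_path)).
import Mathlib
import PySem

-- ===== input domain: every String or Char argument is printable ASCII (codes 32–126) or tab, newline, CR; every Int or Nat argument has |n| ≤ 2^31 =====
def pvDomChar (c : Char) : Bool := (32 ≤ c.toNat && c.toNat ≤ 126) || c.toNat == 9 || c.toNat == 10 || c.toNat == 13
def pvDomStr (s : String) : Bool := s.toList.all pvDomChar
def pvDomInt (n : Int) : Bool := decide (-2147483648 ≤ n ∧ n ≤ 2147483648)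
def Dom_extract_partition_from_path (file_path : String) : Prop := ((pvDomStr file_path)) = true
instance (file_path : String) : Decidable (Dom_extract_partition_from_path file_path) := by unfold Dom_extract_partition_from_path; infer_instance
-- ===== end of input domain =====

-- B replaces A's split-on-'/'-then-loop with a single regex scan of the whole path
-- (dict(re.findall(r'(?:^|(?<=/))([^/=]*)=([^/]*)', file_path))); same return value, a more idiomatic one-liner.

-- ===== PORT A =====
-- loop body of A:  if '=' in part: key, value = part.split('=', 1); partition[key] = value
def pvStepA (d : PySem.Dict (List Char) (List Char)) (part : List Char) : PySem.Dict (List Char) (List Char) :=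
  if PySem.Chars.isIn ['='] part then                          -- '=' in part
    match PySem.Chars.splitOnMax part ['='] 1 with             -- part.split('=', 1)  (sep non-empty, never raises)
    | key :: value :: _ => d.insert key value                  -- partition[key] = value
    | _ => d                                                   -- unreachable: the split yields ≥ 2 pieces when '=' in part
  else d

def extract_partition_from_path (file_path : String) : List (String × String) :=
  let parts := PySem.Chars.splitOn file_path.toList ['/']      -- file_path.split('/')
  let partition := parts.foldl pvStepA PySem.Dict.empty
  partition.items.map (fun p => (String.ofList p.1, String.ofList p.2))

-- ===== PORT B =====
-- hand port of re.findall(r'(?:^|(?<=/))([^/=]*)=([^/]*)', s) for this fixed pattern (PySem has no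
-- regex; exact for it): at each position the engine tries the match — the lookbehind succeeds only at
-- the string start or right after a '/' (tracked by atStart), then key = maximal run of
-- non-'/'/non-'=' chars, one '=', value = maximal run of non-'/' chars; on success it resumes after
-- the match, on failure one character later (atStart there := the char just skipped was '/').
def pvFindall (atStart : Bool) (cs : List Char) : List (List Char × List Char) :=
  match cs with
  | [] => []
  | c0 :: rest =>
    if atStart then
      let r := (c0 :: rest).dropWhile (fun c => c != '/' && c != '=')
      if hr : r.head? = some '=' then
        ((c0 :: rest).takeWhile (fun c => c != '/' && c != '='), r.tail.takeWhile (fun c => c != '/')) ::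
          pvFindall false (r.tail.dropWhile (fun c => c != '/'))
      else
        pvFindall (c0 == '/') rest
    else
      pvFindall (c0 == '/') rest
termination_by cs.length
decreasing_by
  · have h1 : ((c0 :: rest).dropWhile (fun c => c != '/' && c != '=')).length ≤ (c0 :: rest).length :=
      List.length_dropWhile_le _ _
    have h2 : r.tail.length < r.length := by
      cases hr' : r with
      | nil => simp [hr'] at hr
      | cons a as => simp
    have h3 : (r.tail.dropWhile (fun c => c != '/')).length ≤ r.tail.length :=
      List.length_dropWhile_le _ _
    simp only [r] at h2 h3
    omega
  · simp
  · simp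

def extract_partition_from_path_alt (file_path : String) : List (String × String) :=
  let d : PySem.Dict (List Char) (List Char) := PySem.Dict.ofList (pvFindall true file_path.toList)  -- dict(re.findall(...))
  d.items.map (fun p => (String.ofList p.1, String.ofList p.2))

-- ===== PRECONDITION & SPEC =====
def Spec_extract_partition_from_path (file_path : String) (out : List (String × String)) : Prop := out = extract_partition_from_path_alt file_path
instance (file_path : String) (out : List (String × String)) : Decidable (Spec_extract_partition_from_path file_path out) := by unfold Spec_extract_partition_from_path; infer_instance

-- ===== CLAIM (what is proved, stated in full; the proofs are below) =====
def Claim_equal_extract_partition_from_path : Prop := ∀ (file_path : String), Dom_extract_partition_from_path file_path → Spec_extract_partition_from_path file_path (extract_partition_from_path file_path)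

-- ===== LEMMAS AND PROOFS =====

-- split on '/' as a structural recursion (cur = reversed chars of the current piece)
def pvSegsFrom (l : List Char) (cur : List Char) : List (List Char) :=
  match l with
  | [] => [cur.reverse]
  | c :: rest => if c = '/' then cur.reverse :: pvSegsFrom rest [] else pvSegsFrom rest (c :: cur)

-- the single key=value pair A extracts from one '/'-segment (empty if no '=')
def pvSegPairs (seg : List Char) : List (List Char × List Char) :=
  if seg.contains '=' then
    [(seg.takeWhile (fun c => c != '='), (seg.dropWhile (fun c => c != '=')).tail)]
  else []

-- the segments after the first '/' of l (none if l has no '/')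
def pvSegsTail (l : List Char) : List (List Char) :=
  match l.dropWhile (fun c => c != '/') with
  | [] => []
  | _ :: r => pvSegsFrom r []

theorem pv_go_char (fuel : Nat) : ∀ (l cur : List Char) (hacc : List (List Char)),
    l.length < fuel →
    PySem.Chars.splitOn.go ['/'] fuel l cur hacc = hacc.reverse ++ pvSegsFrom l cur := by
  induction fuel with
  | zero => intro l cur hacc h; omega
  | succ f ih =>
    intro l cur hacc h
    cases l with
    | nil => simp [PySem.Chars.splitOn.go, pvSegsFrom]
    | cons c rest =>
      rw [PySem.Chars.splitOn.go]
      by_cases hc : c = '/'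
      · subst hc
        simp only [List.isPrefixOf, BEq.rfl, Bool.true_and, if_pos, List.length, List.drop]
        rw [ih rest [] (cur.reverse :: hacc) (by simpa using Nat.lt_of_succ_lt_succ h)]
        simp [pvSegsFrom]
      · have : (['/'].isPrefixOf (c :: rest)) = false := by
          simp [List.isPrefixOf]; exact fun h' => (hc h'.symm).elim
        rw [this]
        simp only [if_neg Bool.false_ne_true]
        rw [ih rest (c :: cur) hacc (by simpa using Nat.lt_of_succ_lt_succ h)]
        simp [pvSegsFrom, hc]

theorem pv_splitOn_eq (cs : List Char) :
    PySem.Chars.splitOn cs ['/'] = pvSegsFrom cs [] := by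
  unfold PySem.Chars.splitOn
  rw [pv_go_char (cs.length + 1) cs [] [] (by omega)]
  simp

theorem pv_goM0 (fuel : Nat) (l cur : List Char) (acc : List (List Char)) :
    PySem.Chars.splitOnMax.go ['='] fuel 0 l cur acc = acc.reverse ++ [cur.reverse ++ l] := by
  cases fuel with
  | zero => simp [PySem.Chars.splitOnMax.go]
  | succ f => cases l with
    | nil => simp [PySem.Chars.splitOnMax.go]
    | cons c rest => simp [PySem.Chars.splitOnMax.go]

theorem pv_goM (fuel : Nat) : ∀ (l cur : List Char) (acc : List (List Char)),
    l.length < fuel →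
    PySem.Chars.splitOnMax.go ['='] fuel 1 l cur acc =
      if l.contains '=' then
        acc.reverse ++ [cur.reverse ++ l.takeWhile (fun c => c != '='), (l.dropWhile (fun c => c != '=')).tail]
      else acc.reverse ++ [cur.reverse ++ l] := by
  induction fuel with
  | zero => intro l cur acc h; omega
  | succ f ih =>
    intro l cur acc h
    cases l with
    | nil => simp [PySem.Chars.splitOnMax.go]
    | cons c rest =>
      rw [PySem.Chars.splitOnMax.go]
      by_cases hc : c = '='
      · subst hc
        simp only [List.isPrefixOf, BEq.rfl, Bool.true_and, if_pos, List.length, List.drop,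
          one_ne_zero, Nat.sub_self]
        rw [pv_goM0]
        simp [List.takeWhile, List.dropWhile]
      · have hpre : (['='].isPrefixOf (c :: rest)) = false := by
          simp [List.isPrefixOf]; exact fun h' => (hc h'.symm).elim
        rw [if_neg (by omega : ¬ (1 : Nat) = 0), hpre]
        simp only [if_neg Bool.false_ne_true]
        rw [ih rest (c :: cur) acc (by simpa using Nat.lt_of_succ_lt_succ h)]
        have hb : (c != '=') = true := by simp [hc]
        simp [hb]
        by_cases hm : '=' ∈ rest
        · rw [if_pos hm, if_pos (Or.inr hm)]
        · rw [if_neg hm, if_neg (fun hy => by rcases hy with hy | hy; exact hc hy.symm; exact hm hy)]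

theorem pv_splitOnMax_eq (seg : List Char) :
    PySem.Chars.splitOnMax seg ['='] 1 =
      if seg.contains '=' then
        [seg.takeWhile (fun c => c != '='), (seg.dropWhile (fun c => c != '=')).tail]
      else [seg] := by
  unfold PySem.Chars.splitOnMax
  rw [if_neg (by omega : ¬ (1:Int) < 0)]
  rw [show Int.toNat 1 = 1 from rfl]
  rw [pv_goM (seg.length + 1) seg [] [] (by omega)]
  split <;> simp

theorem pv_isIn_eq (seg : List Char) : PySem.Chars.isIn ['='] seg = seg.contains '=' := by
  by_cases h : '=' ∈ seg
  · obtain ⟨s, t, rfl⟩ := List.append_of_mem h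
    rw [(PySem.Chars.isIn_iff_infix _ _).2 ⟨s, t, by simp⟩]
    simp [h]
  · rw [(PySem.Chars.isIn_eq_false_iff _ _).2 (fun hin => h (hin.subset (by simp)))]
    simp [h]

theorem pv_stepA_eq (d : PySem.Dict (List Char) (List Char)) (seg : List Char) :
    pvStepA d seg = d.update (pvSegPairs seg) := by
  unfold pvStepA pvSegPairs
  rw [pv_isIn_eq, pv_splitOnMax_eq]
  by_cases h : '=' ∈ seg <;> simp [h, PySem.Dict.update]

theorem pv_findall_slash (b : Bool) (rest : List Char) :
    pvFindall b ('/' :: rest) = pvFindall true rest := by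
  rw [pvFindall]
  have hd : ('/' :: rest).dropWhile (fun c => c != '/' && c != '=') = '/' :: rest := by
    rw [List.dropWhile_cons_of_neg] ; simp
  cases b <;> simp [hd]

theorem pv_decomp (seg : List Char) (h : '=' ∈ seg) :
    seg.dropWhile (fun c => c != '=') = '=' :: (seg.dropWhile (fun c => c != '=')).tail := by
  have hne : seg.dropWhile (fun c => c != '=') ≠ [] := by
    rw [Ne, List.dropWhile_eq_nil_iff]
    intro hall
    have := hall '=' h
    simp at this
  cases hd : seg.dropWhile (fun c => c != '=') with
  | nil => exact absurd hd hne
  | cons a as =>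
    have hh := List.head_dropWhile_not (fun c => c != '=') (l := seg) (by rw [hd]; simp)
    have ha : a = '=' := by
      have hx : (List.dropWhile (fun c => c != '=') seg).head (by rw [hd]; simp) = a := by
        simp [hd]
      rw [hx] at hh
      simpa using hh
    simp [ha]

theorem pv_findall_no_eq (seg tail : List Char)
    (hs : ∀ c ∈ seg, c ≠ '/' ∧ c ≠ '=')
    (ht : tail = [] ∨ ∃ r', tail = '/' :: r') :
    ∀ b, pvFindall b (seg ++ tail) = pvFindall true tail := by
  induction seg with
  | nil =>
    intro b
    rcases ht with rfl | ⟨r', rfl⟩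
    · cases b <;> simp [pvFindall]
    · simp only [List.nil_append]
      rw [pv_findall_slash b r', ← pv_findall_slash true r']
  | cons c s ih =>
    intro b
    obtain ⟨hc1, hc2⟩ := hs c (by simp)
    have hflag : (c == '/') = false := by simp [hc1]
    have hdrop : ((c :: s) ++ tail).dropWhile (fun c => c != '/' && c != '=') =
        tail.dropWhile (fun c => c != '/' && c != '=') := by
      rw [List.cons_append, List.dropWhile_cons_of_pos (by simp [hc1, hc2])]
      rw [List.dropWhile_append]
      have : (s.dropWhile (fun c => c != '/' && c != '=')) = [] := by
        rw [List.dropWhile_eq_nil_iff]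
        intro x hx
        obtain ⟨h1, h2⟩ := hs x (by simp [hx])
        simp [h1, h2]
      simp [this]
    have htail : tail.dropWhile (fun c => c != '/' && c != '=') = tail := by
      rcases ht with rfl | ⟨r', rfl⟩
      · simp
      · rw [List.dropWhile_cons_of_neg]; simp
    have hhead : (tail.dropWhile (fun c => c != '/' && c != '=')).head? ≠ some '=' := by
      rw [htail]
      rcases ht with rfl | ⟨r', rfl⟩ <;> simp
    rw [List.cons_append, pvFindall]
    cases b
    · simp only [Bool.false_eq_true, if_neg, hflag]
      exact ih (fun c hc => hs c (by simp [hc])) false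
    · simp only [if_pos, ← List.cons_append, hdrop]
      rw [dif_neg hhead, hflag]
      exact ih (fun c hc => hs c (by simp [hc])) false

theorem pv_findall_seg (seg tail : List Char) (hs : ∀ c ∈ seg, c ≠ '/')
    (ht : tail = [] ∨ ∃ r', tail = '/' :: r') :
    pvFindall true (seg ++ tail) = pvSegPairs seg ++ pvFindall true tail := by
  by_cases h : '=' ∈ seg
  · have hd := pv_decomp seg h
    have hsplit := List.takeWhile_append_dropWhile (p := fun c => c != '=') (l := seg)
    set k := seg.takeWhile (fun c => c != '=') with hk
    set v := (seg.dropWhile (fun c => c != '=')).tail with hv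
    have hseg : k ++ '=' :: v = seg := by rw [← hsplit, hd]
    have hkp : ∀ c ∈ k, (fun c => (c != '/' && c != '=')) c = true := by
      intro c hc
      simp only [hk] at hc
      have h1 : (c != '=') = true := List.mem_takeWhile_imp (p := fun c => c != '=') (l := seg) hc
      have h2 : c ≠ '/' := hs c (by rw [← hseg]; exact List.mem_append_left _ hc)
      simp at h1 ⊢
      exact ⟨h2, h1⟩
    have hvp : ∀ c ∈ v, c ≠ '/' := by
      intro c hc
      exact hs c (by rw [← hseg]; exact List.mem_append_right _ (by simp [hc]))
    have hne : seg ++ tail ≠ [] := by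
      intro hx
      rw [← hseg] at hx
      simp at hx
    have hdropall : (seg ++ tail).dropWhile (fun c => c != '/' && c != '=') = '=' :: (v ++ tail) := by
      rw [← hseg, List.append_assoc, List.dropWhile_append]
      have hk0 : k.dropWhile (fun c => c != '/' && c != '=') = [] :=
        List.dropWhile_eq_nil_iff.2 (fun x hx => hkp x hx)
      simp [hk0]
    have htakeall : (seg ++ tail).takeWhile (fun c => c != '/' && c != '=') = k := by
      rw [← hseg, List.append_assoc, List.takeWhile_append]
      have hk0 : k.takeWhile (fun c => c != '/' && c != '=') = k :=
        List.takeWhile_eq_self_iff.2 (fun x hx => hkp x hx)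
      simp [hk0]
    have hvtake : (v ++ tail).takeWhile (fun c => c != '/') = v := by
      rw [List.takeWhile_append]
      have hv0 : v.takeWhile (fun c => c != '/') = v :=
        List.takeWhile_eq_self_iff.2 (fun x hx => by simp [hvp x hx])
      rcases ht with rfl | ⟨r', rfl⟩ <;> simp [hv0]
    have hvdrop : (v ++ tail).dropWhile (fun c => c != '/') = tail := by
      have hv0 : v.dropWhile (fun c => c != '/') = [] :=
        List.dropWhile_eq_nil_iff.2 (fun x hx => by simp [hvp x hx])
      rcases ht with rfl | ⟨r', rfl⟩
      · simpa using hv0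
      · rw [List.dropWhile_append]
        simp [hv0]
    cases hcs : seg ++ tail with
    | nil => exact absurd hcs hne
    | cons a as =>
      rw [pvFindall]
      simp only [if_pos]
      rw [← hcs, hdropall]
      simp only [List.head?_cons, List.tail_cons]
      simp only [reduceDIte]
      rw [htakeall, hvtake, hvdrop]
      have hcont : pvFindall false tail = pvFindall true tail := by
        rcases ht with rfl | ⟨r', rfl⟩
        · simp [pvFindall]
        · rw [pv_findall_slash, pv_findall_slash]
      have hpairs : pvSegPairs seg = [(k, v)] := by
        unfold pvSegPairs
        simp [h, ← hk, ← hv]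
      rw [hpairs, hcont]
      simp
  · have hpairs : pvSegPairs seg = [] := by unfold pvSegPairs; simp [h]
    rw [hpairs, List.nil_append]
    exact pv_findall_no_eq seg tail (fun c hc => ⟨hs c hc, fun he => h (he ▸ hc)⟩) ht true

theorem pvSegsTail_cons (c : Char) (rest : List Char) (hc : (c != '/') = true) :
    pvSegsTail (c :: rest) = pvSegsTail rest := by
  unfold pvSegsTail
  rw [List.dropWhile_cons_of_pos (p := fun c => c != '/') hc]

theorem pvSegsFrom_eq (l : List Char) : ∀ cur : List Char,
    pvSegsFrom l cur = (cur.reverse ++ l.takeWhile (fun c => c != '/')) :: pvSegsTail l := by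
  induction l with
  | nil => intro cur; simp [pvSegsFrom, pvSegsTail]
  | cons c rest ih =>
    intro cur
    by_cases hc : c = '/'
    · subst hc
      rw [pvSegsFrom, if_pos rfl]
      have h1 : List.takeWhile (fun c => c != '/') ('/' :: rest) = [] := by simp
      have h2 : pvSegsTail ('/' :: rest) = pvSegsFrom rest [] := by
        unfold pvSegsTail
        rw [List.dropWhile_cons_of_neg (by simp)]
      rw [h1, h2]
      simp
    · rw [pvSegsFrom, if_neg hc, ih (c :: cur)]
      have hb : (c != '/') = true := by simp [hc]
      rw [List.takeWhile_cons_of_pos (p := fun c => c != '/') hb, pvSegsTail_cons c rest hb]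
      simp

theorem pv_update_append (d : PySem.Dict (List Char) (List Char))
    (xs ys : List (List Char × List Char)) :
    d.update (xs ++ ys) = (d.update xs).update ys := by
  unfold PySem.Dict.update
  exact List.foldl_append

theorem pv_main (n : Nat) : ∀ (l : List Char), l.length ≤ n →
    ∀ (d : PySem.Dict (List Char) (List Char)),
    (pvSegsFrom l []).foldl pvStepA d = d.update (pvFindall true l) := by
  induction n with
  | zero =>
    intro l hl d
    have : l = [] := List.eq_nil_of_length_eq_zero (Nat.le_zero.1 hl)
    subst this
    simp [pvSegsFrom, pvFindall, pv_stepA_eq, pvSegPairs, PySem.Dict.update]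
  | succ m ih =>
    intro l hl d
    cases hdw : l.dropWhile (fun c => c != '/') with
    | nil =>
      have htw : l.takeWhile (fun c => c != '/') = l := by
        conv_rhs => rw [← List.takeWhile_append_dropWhile (p := fun c => c != '/') (l := l)]
        rw [hdw]
        simp
      have hnos : ∀ c ∈ l, c ≠ '/' := by
        intro c hc
        have := List.dropWhile_eq_nil_iff.1 hdw c hc
        simpa using this
      have hfind := pv_findall_seg l [] hnos (Or.inl rfl)
      rw [pvSegsFrom_eq l [], htw]
      have hst : pvSegsTail l = [] := by unfold pvSegsTail; rw [hdw]
      rw [hst]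
      simp only [List.reverse_nil, List.nil_append, List.foldl_cons, List.foldl_nil]
      rw [pv_stepA_eq]
      simp only [List.append_nil] at hfind
      rw [hfind]
      simp [pvFindall]
    | cons c r' =>
      have hc : c = '/' := by
        have hh := List.head_dropWhile_not (fun c => c != '/') (l := l) (by rw [hdw]; simp)
        have hx : (List.dropWhile (fun c => c != '/') l).head (by rw [hdw]; simp) = c := by
          simp [hdw]
        rw [hx] at hh
        simpa using hh
      subst hc
      have hseg : l.takeWhile (fun c => c != '/') ++ '/' :: r' = l := by
        conv_rhs => rw [← List.takeWhile_append_dropWhile (p := fun c => c != '/') (l := l)]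
        rw [hdw]
      have hlen : r'.length ≤ m := by
        have := congrArg List.length hseg
        simp at this
        omega
      have hnos : ∀ c ∈ l.takeWhile (fun c => c != '/'), c ≠ '/' := by
        intro c hc
        have := List.mem_takeWhile_imp (p := fun c => c != '/') (l := l) hc
        simpa using this
      rw [pvSegsFrom_eq l []]
      have hst : pvSegsTail l = pvSegsFrom r' [] := by unfold pvSegsTail; rw [hdw]
      rw [hst]
      simp only [List.reverse_nil, List.nil_append, List.foldl_cons]
      rw [pv_stepA_eq, ih r' hlen]
      conv_rhs => rw [← hseg]
      rw [pv_findall_seg (l.takeWhile (fun c => c != '/')) ('/' :: r') hnos (Or.inr ⟨r', rfl⟩)]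
      rw [pv_findall_slash, pv_update_append]

-- ===== VERDICT (by name: the statement is the Claim_ definition above) =====
theorem extract_partition_from_path_spec : Claim_equal_extract_partition_from_path := by
  intro fp _
  simp only [Spec_extract_partition_from_path, extract_partition_from_path,
    extract_partition_from_path_alt, pv_splitOn_eq,
    pv_main fp.toList.length fp.toList le_rfl]
  rfl
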